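-- pv_equiv track=rewrite | github.com/civic-interconnect/agents-monitor-mapping | parsers/ocd_county_extractor.py | extract_county_slug
-- ===== SOURCE A (Python) =====
-- def extract_county_slug(ocd_id: str) -> str:
--     """
--     Extract the county slug (lowercase, underscore form) from an OCD division ID.
--
--     Example:
--         'ocd-division/country:us/state:mn/county:st_louis' -> 'st_louis'
--     """
--     return next(
--         (
--             part.split(":")[1]
--             for part in ocd_id.split("/")
--             if part.startswith("county:")
--         ),
--         "",
--     )
-- ===== SOURCE B (Python) =====
-- def extract_county_slug(ocd_id: str) -> str:
--     """
--     Extract the county slug from an OCD division ID by scanning a sliding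
--     window instead of building the list of '/'-separated parts.
--     """
--     s = ocd_id
--     while True:
--         if s.startswith("county:"):
--             rest = s[7:]
--             i = 0
--             while i < len(rest) and rest[i] != ":" and rest[i] != "/":
--                 i += 1
--             return rest[:i]
--         # advance past the next '/'; no '/' left means no county part
--         j = 0
--         while j < len(s) and s[j] != "/":
--             j += 1
--         if j == len(s):
--             return ""
--         s = s[j + 1:]
-- ===== Notes on version B (the rewrite author's own statement) =====
-- stated objective: alternative
-- what changed: Replaces building the list of '/'-separated parts plus a generator scan and a second split(':') with a sliding-window scanner that tests the literal prefix 'county:' at each part boundary and slices the slug out directly, constructing no intermediate part lists.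
import Mathlib
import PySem

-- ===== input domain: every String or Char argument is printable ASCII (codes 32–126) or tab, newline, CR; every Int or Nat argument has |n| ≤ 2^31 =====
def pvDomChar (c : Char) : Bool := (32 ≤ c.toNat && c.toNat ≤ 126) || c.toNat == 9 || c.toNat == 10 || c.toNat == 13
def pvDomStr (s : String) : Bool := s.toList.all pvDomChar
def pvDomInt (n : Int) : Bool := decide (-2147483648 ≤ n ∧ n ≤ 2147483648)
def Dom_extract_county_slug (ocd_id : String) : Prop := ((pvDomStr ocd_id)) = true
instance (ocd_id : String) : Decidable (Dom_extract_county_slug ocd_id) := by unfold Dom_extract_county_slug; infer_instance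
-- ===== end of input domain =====

-- B replaces the split('/')-list + generator scan with a single sliding-window scanner
-- over the string; same return value (alternative decomposition, no speed claim).


-- ===== PORT A =====
-- next((part.split(":")[1] for part in ocd_id.split("/") if part.startswith("county:")), "")
def extract_county_slug (ocd_id : String) : String :=
  match PySem.Str.split? ocd_id "/" with
  | none => ""      -- unreachable: the separator "/" is nonempty
  | some parts =>
    match parts.find? (fun part => PySem.Str.startswith part "county:") with
    | none => ""    -- next's default
    | some part =>
      match PySem.Str.split? part ":" with
      | none => ""  -- unreachable: the separator ":" is nonempty
      | some pieces =>
        match PySem.List.pyGet? pieces 1 with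
        | none => ""  -- unreachable: part starts with "county:", so it contains ':'
        | some s => s

-- ===== PORT B =====
-- sliding-window scanner of Source B: check 'county:' at the current part start,
-- otherwise advance past the next '/'
def pvScan (cs : List Char) : List Char :=
  if PySem.Chars.startswith cs "county:".toList then
    -- rest = s[7:]; take chars until ':' or '/'
    (cs.drop 7).takeWhile (fun c => !(c == ':') && !(c == '/'))
  else
    match h : cs.dropWhile (fun c => !(c == '/')) with
    | [] => []                      -- no '/' left
    | _ :: rest => pvScan rest      -- s = s[j+1:]
termination_by cs.length
decreasing_by
  have h1 : (cs.dropWhile (fun c => !(c == '/'))).length ≤ cs.length :=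
    List.length_dropWhile_le _ _
  rw [h] at h1
  simp at h1
  omega

def extract_county_slug_alt (ocd_id : String) : String :=
  String.ofList (pvScan ocd_id.toList)

-- ===== PRECONDITION & SPEC =====
def Spec_extract_county_slug (ocd_id : String) (out : String) : Prop := out = extract_county_slug_alt ocd_id
instance (ocd_id : String) (out : String) : Decidable (Spec_extract_county_slug ocd_id out) := by unfold Spec_extract_county_slug; infer_instance

-- ===== CLAIM (what is proved, stated in full; the proofs are below) =====
def Claim_equal_extract_county_slug : Prop := ∀ (ocd_id : String), Dom_extract_county_slug ocd_id → Spec_extract_county_slug ocd_id (extract_county_slug ocd_id)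

-- ===== LEMMAS AND PROOFS =====

-- simple structural single-character split, equal to PySem.Chars.splitOn with a 1-char sep
def pvSplit (c : Char) : List Char → List (List Char)
  | [] => [[]]
  | a :: rest => if a == c then [] :: pvSplit c rest else (pvSplit c rest).modifyHead (a :: ·)

theorem pvSplit_ne_nil (c : Char) (cs : List Char) : pvSplit c cs ≠ [] := by
  induction cs with
  | nil => simp [pvSplit]
  | cons a rest ih =>
    simp only [pvSplit]
    split
    · simp
    · cases h : pvSplit c rest with
      | nil => exact absurd h ih
      | cons x xs => simp

theorem splitOn_go_eq (c : Char) : ∀ (fuel : Nat) (l cur acc : _), l.length ≤ fuel →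
    PySem.Chars.splitOn.go [c] fuel l cur acc
      = acc.reverse ++ (pvSplit c l).modifyHead (cur.reverse ++ ·) := by
  intro fuel
  induction fuel with
  | zero =>
    intro l cur acc hl
    have : l = [] := List.eq_nil_of_length_eq_zero (Nat.le_zero.mp hl)
    subst this
    simp [PySem.Chars.splitOn.go, pvSplit]
  | succ f ih =>
    intro l cur acc hl
    cases l with
    | nil => simp [PySem.Chars.splitOn.go, pvSplit]
    | cons a rest =>
      simp only [PySem.Chars.splitOn.go]
      by_cases hac : a = c
      · subst hac
        have hpre : [a].isPrefixOf (a :: rest) = true := by simp [List.isPrefixOf]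
        rw [if_pos hpre]
        simp only [List.length, List.drop_succ_cons, List.drop_zero] at *
        rw [ih rest [] (cur.reverse :: acc) (by omega)]
        have hid : List.modifyHead (fun x => x) (pvSplit a rest) = pvSplit a rest := by
          cases pvSplit a rest <;> simp [List.modifyHead]
        simp [pvSplit, hid]
      · have hpre : [c].isPrefixOf (a :: rest) = false := by
          simp [List.isPrefixOf]
          exact fun h => absurd h.symm hac
        rw [hpre]
        simp only [Bool.false_eq_true, if_false]
        simp only [List.length] at hl
        rw [ih rest (a :: cur) acc (by omega)]
        simp only [pvSplit, beq_iff_eq, if_neg hac]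
        cases h : pvSplit c rest with
        | nil => exact absurd h (pvSplit_ne_nil c rest)
        | cons x xs => simp

theorem splitOn_eq_pvSplit (c : Char) (cs : List Char) :
    PySem.Chars.splitOn cs [c] = pvSplit c cs := by
  have := splitOn_go_eq c (cs.length + 1) cs [] [] (by omega)
  have hid : List.modifyHead (fun x => x) (pvSplit c cs) = pvSplit c cs := by
    cases pvSplit c cs <;> simp [List.modifyHead]
  simpa [PySem.Chars.splitOn, hid] using this

-- head/tail characterisation of pvSplit, matching pvScan's step
theorem pvSplit_char (c : Char) (cs : List Char) :
    pvSplit c cs = cs.takeWhile (fun a => !(a == c)) ::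
      (match cs.dropWhile (fun a => !(a == c)) with
       | [] => []
       | _ :: r => pvSplit c r) := by
  induction cs with
  | nil => simp [pvSplit]
  | cons a rest ih =>
    by_cases hac : a = c
    · subst hac
      simp [pvSplit]
    · simp only [pvSplit, beq_iff_eq, if_neg hac, List.takeWhile_cons, List.dropWhile_cons]
      rw [ih]
      simp [hac]

-- char-level version of port A's computation
def pvA (cs : List Char) : List Char :=
  match (pvSplit '/' cs).find? (fun p => PySem.Chars.startswith p "county:".toList) with
  | none => []
  | some part =>
    match (pvSplit ':' part)[1]? with
    | none => []
    | some s => s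

theorem takeWhile_colon_slash (l : List Char) :
    (l.takeWhile (fun a => !(a == '/'))).takeWhile (fun a => !(a == ':'))
      = l.takeWhile (fun c => !(c == ':') && !(c == '/')) := by
  induction l with
  | nil => rfl
  | cons a rest ih =>
    by_cases h1 : a = '/'
    · subst h1; simp
    · by_cases h2 : a = ':'
      · subst h2; simp
      · simp [h1, h2, ih]

-- the main induction: A's char-level computation equals B's scanner
theorem pvA_eq_pvScan (cs : List Char) : pvA cs = pvScan cs := by
  induction hn : cs.length using Nat.strong_induction_on generalizing cs with
  | _ n ih =>
  subst hn
  by_cases h : PySem.Chars.startswith cs "county:".toList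
  · -- 'county:' is a prefix of cs
    rw [pvScan, if_pos h]
    obtain ⟨t, ht⟩ : ∃ t, cs = 'c'::'o'::'u'::'n'::'t'::'y'::':'::t := by
      have := (List.isPrefixOf_iff_prefix).mp h
      obtain ⟨t, ht⟩ := this
      exact ⟨t, by rw [← ht]; rfl⟩
    subst ht
    rw [pvA, pvSplit_char]
    simp only [List.takeWhile_cons]
    -- the first seven characters are not '/', so they survive takeWhile
    simp only [show (('c' == '/') = false) from rfl, show (('o' == '/') = false) from rfl,
      show (('u' == '/') = false) from rfl, show (('n' == '/') = false) from rfl,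
      show (('t' == '/') = false) from rfl, show (('y' == '/') = false) from rfl,
      show ((':' == '/') = false) from rfl, Bool.not_false, if_true]
    rw [List.find?_cons_of_pos]
    · -- the found part; compute its ':'-split
      simp only [pvSplit, show (('c' == ':') = false) from rfl, show (('o' == ':') = false) from rfl,
        show (('u' == ':') = false) from rfl, show (('n' == ':') = false) from rfl,
        show (('t' == ':') = false) from rfl, show (('y' == ':') = false) from rfl,
        show ((':' == ':') = true) from rfl, Bool.false_eq_true, if_false, if_true]
      rw [pvSplit_char ':']
      simp only [List.modifyHead]
      rw [takeWhile_colon_slash]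
      rfl
    · -- 'county:' is a prefix of the part
      simp only [PySem.Chars.startswith]
      rw [List.isPrefixOf_iff_prefix]
      exact ⟨(t.takeWhile (fun a => !(a == '/'))), rfl⟩
  · -- no 'county:' at this part start: both sides skip to after the next '/'
    rw [pvScan, if_neg h, pvA, pvSplit_char]
    rw [List.find?_cons_of_neg]
    · cases hdrop : cs.dropWhile (fun a => !(a == '/')) with
      | nil => simp
      | cons x rest =>
        simp only
        have hlen : rest.length < cs.length := by
          have h1 : (cs.dropWhile (fun a => !(a == '/'))).length ≤ cs.length :=
            List.length_dropWhile_le _ _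
          rw [hdrop] at h1
          simp at h1
          omega
        have := ih rest.length hlen rest rfl
        rw [pvA] at this
        exact this
    · -- 'county:' is not a prefix of the head part, else it would prefix cs
      intro hcontra
      apply h
      simp only [PySem.Chars.startswith, List.isPrefixOf_iff_prefix] at hcontra ⊢
      exact hcontra.trans (List.takeWhile_prefix _)

-- bridge: port A computes String.ofList of the char-level pvA
theorem extract_eq_pvA (ocd_id : String) :
    extract_county_slug ocd_id = String.ofList (pvA ocd_id.toList) := by
  rw [extract_county_slug]
  have h1 : PySem.Str.split? ocd_id "/"
      = some ((pvSplit '/' ocd_id.toList).map String.ofList) := by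
    simp [PySem.Str.split?, PySem.Chars.split?, splitOn_eq_pvSplit, show "/".toList = ['/'] from rfl]
  rw [h1]
  simp only [List.find?_map]
  have h2 : ((fun part => PySem.Str.startswith part "county:") ∘ String.ofList)
      = (fun p => PySem.Chars.startswith p "county:".toList) := by
    funext p
    simp [PySem.Str.startswith]
  rw [h2, pvA]
  cases hf : (pvSplit '/' ocd_id.toList).find? (fun p => PySem.Chars.startswith p "county:".toList) with
  | none => simp only [hf, Option.map_none]
  | some part =>
    simp only [Option.map_some]
    have h3 : PySem.Str.split? (String.ofList part) ":"
        = some ((pvSplit ':' part).map String.ofList) := by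
      simp [PySem.Str.split?, PySem.Chars.split?, splitOn_eq_pvSplit, show ":".toList = [':'] from rfl]
    simp only [h3]
    have h4 : PySem.List.pyGet? ((pvSplit ':' part).map String.ofList) 1
        = ((pvSplit ':' part)[1]?).map String.ofList := by
      simp [PySem.List.pyGet?, PySem.List.pyIdx?]
      split
      · simp
      · rename_i hlen
        rw [List.getElem?_eq_none]
        · simp
        · omega
    rw [h4]
    cases hg : (pvSplit ':' part)[1]? with
    | none => simp only [Option.map_none]
    | some s => simp

-- ===== VERDICT (by name: the statement is the Claim_ definition above) =====
theorem extract_county_slug_spec : Claim_equal_extract_county_slug := by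
  intro ocd_id _
  unfold Spec_extract_county_slug extract_county_slug_alt
  rw [extract_eq_pvA, pvA_eq_pvScan]
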